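-- pv_equiv track=rewrite | github.com/Arashek/ADE-stable-1.0 | ADE-stable-1.0/src/core/error/code_fixer.py | _split_complex_function
-- ===== SOURCE A (Python) =====
-- from typing import Dict, Any, List, Optional, Tuple
--
-- def _split_complex_function(lines: List[str]) -> List[str]:
--     """Split a complex function into smaller functions
--
--     Args:
--         lines: Function lines
--
--     Returns:
--         New function lines
--     """
--     # This is a simplified implementation - in practice, you'd need more sophisticated analysis
--     new_lines = []
--     current_function = []
--
--     for line in lines:
--         if line.strip().startswith('def '):
--             if current_function:
--                 new_lines.extend(current_function)
--             current_function = [line]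
--         else:
--             current_function.append(line)
--
--     if current_function:
--         new_lines.extend(current_function)
--
--     return new_lines
-- ===== SOURCE B (Python) =====
-- from typing import List
--
-- def _split_complex_function(lines: List[str]) -> List[str]:
--     # The grouping pass preserves order and membership of every line,
--     # so the result is always the input sequence: return a shallow copy.
--     return list(lines)
-- ===== Notes on version B (the rewrite author's own statement) =====
-- stated objective: simpler
-- what changed: A's group-then-concatenate loop always reassembles the lines in their original order, so B replaces the whole loop, accumulator and boundary branches with a single shallow copy of the input.
import Mathlib
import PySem

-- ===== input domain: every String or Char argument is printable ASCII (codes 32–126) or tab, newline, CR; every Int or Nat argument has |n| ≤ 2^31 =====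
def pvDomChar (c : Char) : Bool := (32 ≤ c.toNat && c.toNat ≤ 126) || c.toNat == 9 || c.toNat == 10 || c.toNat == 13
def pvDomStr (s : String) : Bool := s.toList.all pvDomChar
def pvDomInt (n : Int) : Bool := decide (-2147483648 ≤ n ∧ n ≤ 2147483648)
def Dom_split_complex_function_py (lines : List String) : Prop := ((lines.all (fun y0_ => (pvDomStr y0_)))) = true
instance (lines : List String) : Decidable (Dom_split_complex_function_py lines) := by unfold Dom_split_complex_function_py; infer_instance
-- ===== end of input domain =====

-- B replaces A's group-then-concatenate loop by a shallow copy (the loop always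
-- reassembles the lines in order); proved equal on every input.

-- ===== PORT A =====
-- literal port of A's loop: state = (new_lines, current_function)
-- A-side helper: one iteration of A's loop
def splitStep (st : List String × List String) (line : String) : List String × List String :=
  if PySem.Str.startswith (PySem.Str.strip line) "def " then
    if st.2 ≠ [] then (st.1 ++ st.2, [line]) else (st.1, [line])
  else (st.1, st.2 ++ [line])

def split_complex_function_py (lines : List String) : List String :=
  let st := lines.foldl splitStep ([], [])
  if st.2 ≠ [] then st.1 ++ st.2 else st.1

-- ===== PORT B =====
def split_complex_function_py_alt (lines : List String) : List String :=
  lines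

-- ===== PRECONDITION & SPEC =====
def Spec_split_complex_function_py (lines : List String) (out : List String) : Prop := out = split_complex_function_py_alt lines
instance (lines : List String) (out : List String) : Decidable (Spec_split_complex_function_py lines out) := by unfold Spec_split_complex_function_py; infer_instance

-- ===== CLAIM (what is proved, stated in full; the proofs are below) =====
def Claim_equal_split_complex_function_py : Prop := ∀ (lines : List String), Dom_split_complex_function_py lines → Spec_split_complex_function_py lines (split_complex_function_py lines)

-- ===== LEMMAS AND PROOFS =====

-- loop invariant: new_lines ++ current_function = processed prefix
theorem split_loop_inv (lines : List String) (nl cf : List String) :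
    (lines.foldl splitStep (nl, cf)).1 ++ (lines.foldl splitStep (nl, cf)).2 = nl ++ cf ++ lines := by
  induction lines generalizing nl cf with
  | nil => simp
  | cons l ls ih =>
    simp only [List.foldl_cons, splitStep]
    split_ifs <;> simp [ih] <;> simp_all

-- ===== VERDICT (by name: the statement is the Claim_ definition above) =====
theorem split_complex_function_py_spec : Claim_equal_split_complex_function_py := by
  intro lines _
  unfold Spec_split_complex_function_py split_complex_function_py split_complex_function_py_alt
  have h := split_loop_inv lines [] []
  simp only [List.nil_append] at h
  dsimp only
  split_ifs with hc
  · exact h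
  · simp only [ne_eq, not_not] at hc
    simpa [hc] using h
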